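-- pv_equiv track=rewrite | github.com/jjoshua2/arc_agi | dupes/4938f0c2_group-003/train_only/1338.py | transform
-- ===== SOURCE A (Python) =====
-- from collections import deque
--
-- def transform(grid_lst: list[list[int]]) -> list[list[int]]:
--     if not grid_lst or not grid_lst[0]:
--         return []
--
--     grid = [row[:] for row in grid_lst]
--     rows, cols = len(grid), len(grid[0])
--
--     visited = set()
--     queue = deque()
--
--     # Add all border 0s to queue and visited
--     for i in range(rows):
--         # left border
--         if grid[i][0] == 0:
--             queue.append((i, 0))
--             visited.add((i, 0))
--         # right border
--         if grid[i][cols - 1] == 0: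
--             queue.append((i, cols - 1))
--             visited.add((i, cols - 1))
--
--     for j in range(cols):
--         # top border
--         if grid[0][j] == 0:
--             queue.append((0, j))
--             visited.add((0, j))
--         # bottom border
--         if grid[rows - 1][j] == 0:
--             queue.append((rows - 1, j))
--             visited.add((rows - 1, j))
--
--     directions = [(0, 1), (1, 0), (0, -1), (-1, 0)]
--
--     while queue:
--         x, y = queue.popleft()
--         for dx, dy in directions:
--             nx, ny = x + dx, y + dy
--             if 0 <= nx < rows and 0 <= ny < cols and grid[nx][ny] == 0 and (nx, ny) not in visited:
--                 visited.add((nx, ny))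
--                 queue.append((nx, ny))
--
--     # Fill unvisited 0s with 3
--     for i in range(rows):
--         for j in range(cols):
--             if grid[i][j] == 0 and (i, j) not in visited:
--                 grid[i][j] = 3
--
--     return grid
-- ===== SOURCE B (Python) =====
-- def transform(grid_lst: list[list[int]]) -> list[list[int]]:
--     if not grid_lst or not grid_lst[0]:
--         return []
--     rows, cols = len(grid_lst), len(grid_lst[0])
--
--     # Greatest-fixpoint elimination: start with every 0-cell as a candidate
--     # "enclosed" cell, then repeatedly delete candidates that sit on the border
--     # or touch a 0-cell already deleted, until the set is stable.
--     enclosed = {(i, j) for i in range(rows) for j in range(cols)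
--                 if grid_lst[i][j] == 0}
--     changed = True
--     while changed:
--         keep = set()
--         for (i, j) in enclosed:
--             if i in (0, rows - 1) or j in (0, cols - 1):
--                 continue
--             if all((ni, nj) in enclosed or grid_lst[ni][nj] != 0
--                    for ni, nj in ((i - 1, j), (i + 1, j), (i, j - 1), (i, j + 1))):
--                 keep.add((i, j))
--         changed = len(keep) != len(enclosed)
--         enclosed = keep
--
--     return [[3 if (i, j) in enclosed else v for j, v in enumerate(row)]
--             for i, row in enumerate(grid_lst)]
-- ===== Notes on version B (the rewrite author's own statement) =====
-- stated objective: alternative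
-- what changed: A's border-seeded BFS flood fill (deque + visited set over a mutated deep copy) is replaced by a greatest-fixpoint elimination: start from the set of ALL 0-cells and repeatedly sweep it, deleting every candidate that lies on the border or touches a 0-cell already deleted, until the set is stable; the survivors are exactly the enclosed zeros and are filled with 3 in a pure comprehension.
import Mathlib
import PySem

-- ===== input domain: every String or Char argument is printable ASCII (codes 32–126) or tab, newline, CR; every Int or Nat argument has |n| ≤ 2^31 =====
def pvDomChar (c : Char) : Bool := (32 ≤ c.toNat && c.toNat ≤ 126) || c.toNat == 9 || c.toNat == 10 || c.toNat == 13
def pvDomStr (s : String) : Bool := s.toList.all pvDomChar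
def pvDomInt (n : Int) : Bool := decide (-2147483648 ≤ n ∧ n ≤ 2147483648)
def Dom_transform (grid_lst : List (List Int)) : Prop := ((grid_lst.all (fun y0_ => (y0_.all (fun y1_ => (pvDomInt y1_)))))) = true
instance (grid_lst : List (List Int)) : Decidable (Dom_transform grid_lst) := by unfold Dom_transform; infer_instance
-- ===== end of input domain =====

-- B replaces A's border-seeded BFS flood fill by a greatest-fixpoint elimination: it starts
-- from the set of all 0-cells and repeatedly deletes border cells and cells touching a
-- deleted 0 until stable, then fills the survivors (alternative decomposition, not faster).

-- ===== PORT A =====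

-- grid[i][j] (both reads are in range wherever the Python performs them on Pre_ inputs)
def pvAt (grid : List (List Int)) (i j : Int) : Option Int :=
  (PySem.List.pyGet? grid i).bind (fun row => PySem.List.pyGet? row j)

-- 'if grid[i][0] == 0: queue.append(..); visited.add(..)' for one border candidate
def pvSeedStepA (grid : List (List Int))
    (st : List (Int × Int) × PySem.Set (Int × Int)) (p : Int × Int) :
    List (Int × Int) × PySem.Set (Int × Int) :=
  if pvAt grid p.1 p.2 == some 0 then (st.1 ++ [p], PySem.Set.add st.2 p) else st

-- the two border-seeding for-loops
def pvSeedA (grid : List (List Int)) (rows cols : Int) :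
    List (Int × Int) × PySem.Set (Int × Int) :=
  let st1 := (PySem.List.pyRange 0 rows 1).foldl
    (fun st i => pvSeedStepA grid (pvSeedStepA grid st (i, 0)) (i, cols - 1))
    ([], PySem.Set.empty)
  (PySem.List.pyRange 0 cols 1).foldl
    (fun st j => pvSeedStepA grid (pvSeedStepA grid st (0, j)) (rows - 1, j)) st1

def pvDirsA : List (Int × Int) := [(0, 1), (1, 0), (0, -1), (-1, 0)]

-- body of 'for dx, dy in directions: …' for one neighbour n
def pvStepA (grid : List (List Int)) (rows cols : Int)
    (st : List (Int × Int) × PySem.Set (Int × Int)) (n : Int × Int) :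
    List (Int × Int) × PySem.Set (Int × Int) :=
  if (decide (0 ≤ n.1) && decide (n.1 < rows) && decide (0 ≤ n.2) && decide (n.2 < cols))
      && (pvAt grid n.1 n.2 == some 0) && !(PySem.Set.contains st.2 n)
  then (st.1 ++ [n], PySem.Set.add st.2 n) else st

-- 'while queue: …' — fuel only makes the recursion total; it is proved sufficient below,
-- and the loop stops by itself when the queue empties
def pvBfsA (grid : List (List Int)) (rows cols : Int) :
    Nat → List (Int × Int) → PySem.Set (Int × Int) → PySem.Set (Int × Int)
  | 0, _, visited => visited
  | _ + 1, [], visited => visited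
  | fuel + 1, c :: qs, visited =>
      let st := pvDirsA.foldl
        (fun st d => pvStepA grid rows cols st (c.1 + d.1, c.2 + d.2)) (qs, visited)
      pvBfsA grid rows cols fuel st.1 st.2

def transform (grid_lst : List (List Int)) : List (List Int) :=
  if grid_lst.isEmpty || (grid_lst.headD []).isEmpty then [] else
  let grid := grid_lst.map (fun row => PySem.List.slice row none none)
  let rows : Int := PySem.List.len grid
  let cols : Int := PySem.List.len (grid.headD [])
  let st := pvSeedA grid rows cols
  let visited := pvBfsA grid rows cols (st.1.length + 2 * (rows.toNat * cols.toNat)) st.1 st.2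
  (PySem.List.pyRange 0 rows 1).foldl (fun g i =>
    (PySem.List.pyRange 0 cols 1).foldl (fun g j =>
      if (pvAt g i j == some 0) && !(PySem.Set.contains visited (i, j))
      then PySem.List.pySetD g i (PySem.List.pySetD (PySem.List.pyGetD g i []) j 3) else g) g)
    grid

-- ===== PORT B =====

-- the neighbour tuple ((i-1,j),(i+1,j),(i,j-1),(i,j+1))
def pvNbrs (c : Int × Int) : List (Int × Int) :=
  [(c.1 - 1, c.2), (c.1 + 1, c.2), (c.1, c.2 - 1), (c.1, c.2 + 1)]

-- the set comprehension '{(i, j) … if grid_lst[i][j] == 0}'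
def pvZeros (grid : List (List Int)) (rows cols : Int) : PySem.Set (Int × Int) :=
  (PySem.List.pyRange 0 rows 1).foldl (fun s i =>
    (PySem.List.pyRange 0 cols 1).foldl (fun s j =>
      if pvAt grid i j == some 0 then PySem.Set.add s (i, j) else s) s)
    PySem.Set.empty

-- one candidate survives the sweep: not on the border ('i in (0, rows-1) or j in (0, cols-1)'
-- → continue) and every in-bounds 0 neighbour is still a candidate
def pvKeepCond (grid : List (List Int)) (rows cols : Int)
    (enclosed : PySem.Set (Int × Int)) (p : Int × Int) : Bool :=
  !(p.1 == 0 || p.1 == rows - 1 || p.2 == 0 || p.2 == cols - 1) &&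
  (pvNbrs p).all (fun n =>
    PySem.Set.contains enclosed n || !(pvAt grid n.1 n.2 == some 0))

-- 'keep = set(); for (i, j) in enclosed: … keep.add((i, j))'
def pvSweep (grid : List (List Int)) (rows cols : Int)
    (enclosed : PySem.Set (Int × Int)) : PySem.Set (Int × Int) :=
  enclosed.foldl (fun k p =>
    if pvKeepCond grid rows cols enclosed p then PySem.Set.add k p else k)
    PySem.Set.empty

-- 'while changed: …' — fuel only makes the recursion total; it is proved sufficient below
-- (every sweep either leaves the set unchanged, ending the loop, or strictly shrinks it)
def pvShrink (grid : List (List Int)) (rows cols : Int) :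
    Nat → PySem.Set (Int × Int) → PySem.Set (Int × Int)
  | 0, e => e
  | fuel + 1, e =>
      let k := pvSweep grid rows cols e
      if k.length == e.length then k else pvShrink grid rows cols fuel k

def transform_alt (grid_lst : List (List Int)) : List (List Int) :=
  if grid_lst.isEmpty || (grid_lst.headD []).isEmpty then [] else
  let rows : Int := PySem.List.len grid_lst
  let cols : Int := PySem.List.len (grid_lst.headD [])
  let e0 := pvZeros grid_lst rows cols
  let encl := pvShrink grid_lst rows cols (e0.length + 1) e0
  (PySem.List.enumerate grid_lst 0).map (fun ir =>
    (PySem.List.enumerate ir.2 0).map (fun jv =>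
      if PySem.Set.contains encl (ir.1, jv.1) then 3 else jv.2))

-- ===== PRECONDITION & SPEC =====
-- Pre_ excludes exactly the grids with a row shorter than the first row, on which A (and B)
-- raise IndexError while reading a cell of that row at a column below the first row's width.
def Pre_transform (grid_lst : List (List Int)) : Prop :=
  ∀ row ∈ grid_lst, (grid_lst.headD []).length ≤ row.length
instance (grid_lst : List (List Int)) : Decidable (Pre_transform grid_lst) := by
  unfold Pre_transform; infer_instance

def pvWitness_transform : List (List Int) := [[0, 1, 0], [1, 0, 0], [0, 1, 1]]

def Spec_transform (grid_lst : List (List Int)) (out : List (List Int)) : Prop :=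
  out = transform_alt grid_lst
instance (grid_lst : List (List Int)) (out : List (List Int)) : Decidable (Spec_transform grid_lst out) := by
  unfold Spec_transform; infer_instance

-- ===== CLAIM (what is proved, stated in full; the proofs are below) =====
def Claim_equal_transform : Prop := ∀ (grid_lst : List (List Int)), Dom_transform grid_lst → Pre_transform grid_lst → Spec_transform grid_lst (transform grid_lst)

-- ===== LEMMAS AND PROOFS =====

-- a cell that the flood fill may visit: in bounds and holding 0
def pvGood (grid : List (List Int)) (rows cols : Int) (p : Int × Int) : Prop :=
  0 ≤ p.1 ∧ p.1 < rows ∧ 0 ≤ p.2 ∧ p.2 < cols ∧ pvAt grid p.1 p.2 = some 0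

def pvRel (grid : List (List Int)) (rows cols : Int) (p q : Int × Int) : Prop :=
  pvGood grid rows cols q ∧ q ∈ pvNbrs p

def pvBorder (grid : List (List Int)) (rows cols : Int) (p : Int × Int) : Prop :=
  pvGood grid rows cols p ∧ (p.1 = 0 ∨ p.1 = rows - 1 ∨ p.2 = 0 ∨ p.2 = cols - 1)

def pvReach (grid : List (List Int)) (rows cols : Int) (p : Int × Int) : Prop :=
  ∃ b, pvBorder grid rows cols b ∧ Relation.ReflTransGen (pvRel grid rows cols) b p

-- the enclosed cells: in-bounds zeros not reachable from a border zero
def pvEncl (grid : List (List Int)) (rows cols : Int) (p : Int × Int) : Prop :=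
  pvGood grid rows cols p ∧ ¬ pvReach grid rows cols p

lemma pvGoodb_iff (grid : List (List Int)) (rows cols : Int) (n : Int × Int) :
    ((decide (0 ≤ n.1) && decide (n.1 < rows) && decide (0 ≤ n.2) && decide (n.2 < cols))
      && (pvAt grid n.1 n.2 == some 0)) = true ↔ pvGood grid rows cols n := by
  simp [pvGood, and_assoc]

-- the candidate positions of A's two seeding loops
def pvCands (rows cols : Int) : List (Int × Int) :=
  ((PySem.List.pyRange 0 rows 1).flatMap (fun i => [(i, 0), (i, cols - 1)])) ++
  ((PySem.List.pyRange 0 cols 1).flatMap (fun j => [((0 : Int), j), (rows - 1, j)]))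

lemma mem_pvCands (rows cols : Int) (hr : 1 ≤ rows) (hc : 1 ≤ cols) (x : Int × Int) :
    x ∈ pvCands rows cols ↔
      (0 ≤ x.1 ∧ x.1 < rows ∧ 0 ≤ x.2 ∧ x.2 < cols ∧
        (x.1 = 0 ∨ x.1 = rows - 1 ∨ x.2 = 0 ∨ x.2 = cols - 1)) := by
  obtain ⟨x1, x2⟩ := x
  simp only [pvCands, List.mem_append, List.mem_flatMap, PySem.List.mem_pyRange_one,
    List.mem_cons, List.not_mem_nil, or_false, Prod.mk.injEq]
  constructor
  · rintro (⟨i, hi, (⟨e1, e2⟩ | ⟨e1, e2⟩)⟩ | ⟨j, hj, (⟨e1, e2⟩ | ⟨e1, e2⟩)⟩) <;> subst e1 <;> subst e2 <;>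
      simp_all <;> omega
  · rintro ⟨h1, h2, h3, h4, (e | e | e | e)⟩
    · exact Or.inr ⟨x2, ⟨h3, h4⟩, Or.inl ⟨e, rfl⟩⟩
    · exact Or.inr ⟨x2, ⟨h3, h4⟩, Or.inr ⟨e, rfl⟩⟩
    · exact Or.inl ⟨x1, ⟨h1, h2⟩, Or.inl ⟨rfl, e⟩⟩
    · exact Or.inl ⟨x1, ⟨h1, h2⟩, Or.inr ⟨rfl, e⟩⟩

lemma pvSat_iff (grid : List (List Int)) (rows cols : Int) (v : List (Int × Int))
    (h3 : ∀ p ∈ v, pvReach grid rows cols p)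
    (h5 : ∀ p ∈ v, ∀ x, pvRel grid rows cols p x → x ∈ v)
    (h0 : ∀ p, pvBorder grid rows cols p → p ∈ v) :
    ∀ x, x ∈ v ↔ pvReach grid rows cols x := by
  intro x
  constructor
  · exact h3 x
  · rintro ⟨b, hb, path⟩
    induction path with
    | refl => exact h0 b hb
    | tail _ hstep ih => exact h5 _ ih _ hstep

lemma pvCard (grid : List (List Int)) (rows cols : Int) (v : List (Int × Int))
    (hn : v.Nodup) (hg : ∀ p ∈ v, pvGood grid rows cols p) :
    v.length ≤ rows.toNat * cols.toNat := by
  have hsub : v ⊆ (PySem.List.pyRange 0 rows 1) ×ˢ (PySem.List.pyRange 0 cols 1) := by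
    intro p hp
    rcases hg p hp with ⟨h1, h2, h3, h4, _⟩
    exact List.mem_product.mpr ⟨(PySem.List.mem_pyRange_one).mpr ⟨h1, h2⟩,
      (PySem.List.mem_pyRange_one).mpr ⟨h3, h4⟩⟩
  have := (List.subperm_of_subset hn hsub).length_le
  simpa [List.length_product, PySem.List.length_pyRange_one] using this

lemma pvContains_false {v : PySem.Set (Int × Int)} {n : Int × Int} (h : n ∉ v) :
    PySem.Set.contains v n = false := by
  rw [Bool.eq_false_iff]
  intro hc
  exact h ((PySem.Set.contains_iff v n).mp hc)

lemma pvStepA_of_mem (grid : List (List Int)) (rows cols : Int)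
    (q : List (Int × Int)) (v : PySem.Set (Int × Int)) (n : Int × Int) (hm : n ∈ v) :
    pvStepA grid rows cols (q, v) n = (q, v) := by
  simp only [pvStepA]
  rw [if_neg]
  simp
  intro _ _ _ _ _
  exact hm

lemma pvStepA_of_bad (grid : List (List Int)) (rows cols : Int)
    (q : List (Int × Int)) (v : PySem.Set (Int × Int)) (n : Int × Int)
    (hg : ¬ pvGood grid rows cols n) :
    pvStepA grid rows cols (q, v) n = (q, v) := by
  simp only [pvStepA]
  rw [if_neg]
  simp
  intro h1 h2 h3 h4 h5
  exact absurd ⟨h1, h2, h3, h4, h5⟩ hg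

lemma pvStepA_of_new (grid : List (List Int)) (rows cols : Int)
    (q : List (Int × Int)) (v : PySem.Set (Int × Int)) (n : Int × Int)
    (hg : pvGood grid rows cols n) (hm : n ∉ v) :
    pvStepA grid rows cols (q, v) n = (q ++ [n], v ++ [n]) := by
  have hb := (pvGoodb_iff grid rows cols n).mpr hg
  have hcond : ((decide (0 ≤ n.1) && decide (n.1 < rows) && decide (0 ≤ n.2) && decide (n.2 < cols))
      && (pvAt grid n.1 n.2 == some 0) && !(PySem.Set.contains v n)) = true := by
    rw [hb, pvContains_false hm]
    rfl
  simp only [pvStepA]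
  rw [if_pos]
  · rw [PySem.Set.add_of_not_mem hm]
  · exact hcond

lemma pvNodup_append_singleton {v : List (Int × Int)} {n : Int × Int}
    (hv : v.Nodup) (hm : n ∉ v) : (v ++ [n]).Nodup := by
  have := PySem.Set.nodup_add (s := v) (x := n) hv
  rwa [PySem.Set.add_of_not_mem hm] at this

lemma pvInnerA (grid : List (List Int)) (rows cols : Int) (cl : List (Int × Int)) :
    ∀ (q : List (Int × Int)) (v : PySem.Set (Int × Int)), v.Nodup →
    ∃ delta : List (Int × Int),
      cl.foldl (pvStepA grid rows cols) (q, v) = (q ++ delta, v ++ delta) ∧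
      (v ++ delta).Nodup ∧
      (∀ x ∈ delta, pvGood grid rows cols x ∧ x ∈ cl ∧ x ∉ v) ∧
      (∀ x ∈ cl, pvGood grid rows cols x → x ∈ v ++ delta) := by
  induction cl with
  | nil =>
    intro q v hv
    exact ⟨[], by simp, by simpa using hv, by simp, by simp⟩
  | cons n cl ih =>
    intro q v hv
    rw [List.foldl_cons]
    by_cases hmem : n ∈ v
    · rw [pvStepA_of_mem grid rows cols q v n hmem]
      obtain ⟨delta, h1, h2, h3, h4⟩ := ih q v hv
      refine ⟨delta, h1, h2, ?_, ?_⟩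
      · intro x hx
        obtain ⟨hg, hc, hnv⟩ := h3 x hx
        exact ⟨hg, List.mem_cons_of_mem _ hc, hnv⟩
      · intro x hx hg
        rcases List.mem_cons.mp hx with rfl | hx'
        · exact List.mem_append_left _ hmem
        · exact h4 x hx' hg
    · by_cases hgood : pvGood grid rows cols n
      · rw [pvStepA_of_new grid rows cols q v n hgood hmem]
        obtain ⟨delta, h1, h2, h3, h4⟩ := ih (q ++ [n]) (v ++ [n]) (pvNodup_append_singleton hv hmem)
        refine ⟨n :: delta, by simpa using h1, by simpa using h2, ?_, ?_⟩
        · intro x hx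
          rcases List.mem_cons.mp hx with rfl | hx'
          · exact ⟨hgood, List.mem_cons_self .., hmem⟩
          · obtain ⟨hg, hc, hnv⟩ := h3 x hx'
            refine ⟨hg, List.mem_cons_of_mem _ hc, fun hxv => hnv (List.mem_append_left _ hxv)⟩
        · intro x hx hg
          rcases List.mem_cons.mp hx with rfl | hx'
          · simp
          · have := h4 x hx' hg
            simpa using this
      · rw [pvStepA_of_bad grid rows cols q v n hgood]
        obtain ⟨delta, h1, h2, h3, h4⟩ := ih q v hv
        refine ⟨delta, h1, h2, ?_, ?_⟩
        · intro x hx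
          obtain ⟨hg, hc, hnv⟩ := h3 x hx
          exact ⟨hg, List.mem_cons_of_mem _ hc, hnv⟩
        · intro x hx hg
          rcases List.mem_cons.mp hx with rfl | hx'
          · exact absurd hg hgood
          · exact h4 x hx' hg

lemma mem_clA (c x : Int × Int) :
    x ∈ pvDirsA.map (fun d => (c.1 + d.1, c.2 + d.2)) ↔ x ∈ pvNbrs c := by
  simp [pvDirsA, pvNbrs, Prod.ext_iff]
  omega

lemma pvBfsA_spec (grid : List (List Int)) (rows cols : Int) :
    ∀ (fuel : Nat) (q : List (Int × Int)) (v : PySem.Set (Int × Int)),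
    v.Nodup →
    (∀ p ∈ v, pvGood grid rows cols p) →
    (∀ p ∈ v, pvReach grid rows cols p) →
    (∀ p ∈ q, p ∈ v) →
    (∀ p ∈ v, p ∉ q → ∀ x, pvRel grid rows cols p x → x ∈ v) →
    (∀ p, pvBorder grid rows cols p → p ∈ v) →
    q.length + 2 * (rows.toNat * cols.toNat - v.length) ≤ fuel →
    ∀ x, x ∈ pvBfsA grid rows cols fuel q v ↔ pvReach grid rows cols x := by
  intro fuel
  induction fuel with
  | zero =>
    intro q v h1 h2 h3 h4 h5 h0 hf
    have hq : q = [] := by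
      cases q with
      | nil => rfl
      | cons a as => simp at hf
    subst hq
    simpa [pvBfsA] using pvSat_iff grid rows cols v h3 (fun p hp => h5 p hp (by simp)) h0
  | succ fuel ih =>
    intro q v h1 h2 h3 h4 h5 h0 hf
    cases q with
    | nil =>
      simpa [pvBfsA] using pvSat_iff grid rows cols v h3 (fun p hp => h5 p hp (by simp)) h0
    | cons c qs =>
      obtain ⟨delta, heq, hnd, hdel, hcl⟩ := pvInnerA grid rows cols
        (pvDirsA.map (fun d => (c.1 + d.1, c.2 + d.2))) qs v h1
      have hfold : pvDirsA.foldl (fun st d => pvStepA grid rows cols st (c.1 + d.1, c.2 + d.2)) (qs, v)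
          = (qs ++ delta, v ++ delta) := by
        rw [← List.foldl_map]
        exact heq
      have hcv : c ∈ v := h4 c (List.mem_cons_self ..)
      have h2' : ∀ p ∈ v ++ delta, pvGood grid rows cols p := by
        intro p hp
        rcases List.mem_append.mp hp with hp | hp
        · exact h2 p hp
        · exact (hdel p hp).1
      have h3' : ∀ p ∈ v ++ delta, pvReach grid rows cols p := by
        intro p hp
        rcases List.mem_append.mp hp with hp | hp
        · exact h3 p hp
        · obtain ⟨hg, hc, _⟩ := hdel p hp
          obtain ⟨b, hb, path⟩ := h3 c hcv
          exact ⟨b, hb, path.tail ⟨hg, (mem_clA c p).mp hc⟩⟩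
      have h4' : ∀ p ∈ qs ++ delta, p ∈ v ++ delta := by
        intro p hp
        rcases List.mem_append.mp hp with hp | hp
        · exact List.mem_append_left _ (h4 p (List.mem_cons_of_mem _ hp))
        · exact List.mem_append_right _ hp
      have h5' : ∀ p ∈ v ++ delta, p ∉ qs ++ delta →
          ∀ x, pvRel grid rows cols p x → x ∈ v ++ delta := by
        intro p hp hnq x hrel
        rcases List.mem_append.mp hp with hpv | hpd
        · by_cases hpc : p = c
          · subst hpc
            exact hcl x ((mem_clA p x).mpr hrel.2) hrel.1
          · have : p ∉ qs := fun h => hnq (List.mem_append_left _ h)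
            have hpq : p ∉ c :: qs := by
              simp [hpc, this]
            exact List.mem_append_left _ (h5 p hpv hpq x hrel)
        · exact absurd (List.mem_append_right _ hpd) hnq
      have h0' : ∀ p, pvBorder grid rows cols p → p ∈ v ++ delta := by
        intro p hp
        exact List.mem_append_left _ (h0 p hp)
      have hcard := pvCard grid rows cols (v ++ delta) hnd h2'
      have hf' : (qs ++ delta).length + 2 * (rows.toNat * cols.toNat - (v ++ delta).length) ≤ fuel := by
        simp only [List.length_append] at hcard hf ⊢
        simp only [List.length_cons] at hf
        omega
      have := ih (qs ++ delta) (v ++ delta) hnd h2' h3' h4' h5' h0' hf'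
      simpa only [pvBfsA, hfold] using this

lemma pvSeedFold_specA (grid : List (List Int)) (ps : List (Int × Int)) :
    ∀ (q : List (Int × Int)) (v : PySem.Set (Int × Int)), v.Nodup → (∀ x, x ∈ q ↔ x ∈ v) →
    (∀ x, x ∈ (ps.foldl (pvSeedStepA grid) (q, v)).1 ↔ x ∈ (ps.foldl (pvSeedStepA grid) (q, v)).2) ∧
    (ps.foldl (pvSeedStepA grid) (q, v)).2.Nodup ∧
    (∀ x, x ∈ (ps.foldl (pvSeedStepA grid) (q, v)).2 ↔
      x ∈ v ∨ (x ∈ ps ∧ pvAt grid x.1 x.2 = some 0)) := by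
  induction ps with
  | nil =>
    intro q v hv hqv
    exact ⟨hqv, hv, by simp⟩
  | cons p ps ih =>
    intro q v hv hqv
    rw [List.foldl_cons]
    by_cases hz : pvAt grid p.1 p.2 = some 0
    · have hstep : pvSeedStepA grid (q, v) p = (q ++ [p], PySem.Set.add v p) := by
        simp [pvSeedStepA, hz]
      rw [hstep]
      obtain ⟨h1, h2, h3⟩ := ih (q ++ [p]) (PySem.Set.add v p)
        (PySem.Set.nodup_add (s := v) (x := p) hv)
        (by
          intro x
          rw [PySem.Set.mem_add]
          simp [hqv x])
      refine ⟨h1, h2, ?_⟩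
      intro x
      rw [h3 x, PySem.Set.mem_add]
      constructor
      · rintro ((hx | rfl) | ⟨hx, hz'⟩)
        · exact Or.inl hx
        · exact Or.inr ⟨List.mem_cons_self .., hz⟩
        · exact Or.inr ⟨List.mem_cons_of_mem _ hx, hz'⟩
      · rintro (hx | ⟨hx, hz'⟩)
        · exact Or.inl (Or.inl hx)
        · rcases List.mem_cons.mp hx with rfl | hx'
          · exact Or.inl (Or.inr rfl)
          · exact Or.inr ⟨hx', hz'⟩
    · have hstep : pvSeedStepA grid (q, v) p = (q, v) := by
        simp [pvSeedStepA, hz]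
      rw [hstep]
      obtain ⟨h1, h2, h3⟩ := ih q v hv hqv
      refine ⟨h1, h2, ?_⟩
      intro x
      rw [h3 x]
      constructor
      · rintro (hx | ⟨hx, hz'⟩)
        · exact Or.inl hx
        · exact Or.inr ⟨List.mem_cons_of_mem _ hx, hz'⟩
      · rintro (hx | ⟨hx, hz'⟩)
        · exact Or.inl hx
        · rcases List.mem_cons.mp hx with rfl | hx'
          · exact absurd hz' hz
          · exact Or.inr ⟨hx', hz'⟩

lemma pvSeedA_eq (grid : List (List Int)) (rows cols : Int) :
    pvSeedA grid rows cols = (pvCands rows cols).foldl (pvSeedStepA grid) ([], PySem.Set.empty) := by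
  simp [pvSeedA, pvCands, List.foldl_append, List.foldl_flatMap]

-- the grid with rows < a fully transformed and row a transformed on columns < b,
-- the fill acting only on the first W columns (W = the first row's width)
def pvMix (P : Int × Int → Bool) (W : Nat) (grid : List (List Int)) (a b : Nat) : List (List Int) :=
  grid.mapIdx (fun i row => row.mapIdx (fun j v =>
    if ((i < a ∨ (i = a ∧ j < b)) ∧ j < W) ∧ v = 0 ∧ P ((i : Int), (j : Int)) = false then 3 else v))

lemma pvMix_length (P : Int × Int → Bool) (W : Nat) (grid : List (List Int)) (a b : Nat) :
    (pvMix P W grid a b).length = grid.length := by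
  simp [pvMix]

lemma pvMix_getElem (P : Int × Int → Bool) (W : Nat) (grid : List (List Int)) (a b : Nat)
    (i : Nat) (h : i < grid.length) :
    (pvMix P W grid a b)[i]'(by simp [pvMix, h]) =
      (grid[i]'h).mapIdx (fun j v =>
        if ((i < a ∨ (i = a ∧ j < b)) ∧ j < W) ∧ v = 0 ∧ P ((i : Int), (j : Int)) = false then 3 else v) := by
  simp [pvMix]

lemma pvMix_congr (P : Int × Int → Bool) (W : Nat) (grid : List (List Int)) (a b a' b' : Nat)
    (h : ∀ (i j : Nat) (hi : i < grid.length) (hj : j < (grid[i]'hi).length),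
      (grid[i]'hi)[j]'hj = 0 → P ((i : Int), (j : Int)) = false →
      (((i < a ∨ (i = a ∧ j < b)) ∧ j < W) ↔ ((i < a' ∨ (i = a' ∧ j < b')) ∧ j < W))) :
    pvMix P W grid a b = pvMix P W grid a' b' := by
  apply List.ext_getElem (by simp [pvMix])
  intro i h1 h2
  have hi : i < grid.length := by simpa [pvMix] using h1
  rw [pvMix_getElem P W grid a b i hi, pvMix_getElem P W grid a' b' i hi]
  apply List.ext_getElem (by simp)
  intro j hj1 hj2
  have hj : j < (grid[i]'hi).length := by simpa using hj1
  rw [List.getElem_mapIdx, List.getElem_mapIdx]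
  by_cases hz : (grid[i]'hi)[j]'hj = 0
  · by_cases hP : P ((i : Int), (j : Int)) = false
    · have hiff := h i j hi hj hz hP
      by_cases hcond : ((i < a ∨ (i = a ∧ j < b)) ∧ j < W)
      · rw [if_pos ⟨hcond, hz, hP⟩, if_pos ⟨hiff.mp hcond, hz, hP⟩]
      · rw [if_neg (fun h' => hcond h'.1), if_neg (fun h' => hcond (hiff.mpr h'.1))]
    · rw [if_neg (fun h' => hP h'.2.2), if_neg (fun h' => hP h'.2.2)]
  · rw [if_neg (fun h' => hz h'.2.1), if_neg (fun h' => hz h'.2.1)]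

lemma pvMix_zero (P : Int × Int → Bool) (W : Nat) (grid : List (List Int)) :
    pvMix P W grid 0 0 = grid := by
  apply List.ext_getElem (by simp [pvMix])
  intro i h1 h2
  rw [pvMix_getElem P W grid 0 0 i h2]
  apply List.ext_getElem (by simp)
  intro j hj1 hj2
  rw [List.getElem_mapIdx]
  simp

lemma pvAt_mix (P : Int × Int → Bool) (W : Nat) (grid : List (List Int)) (a b : Nat)
    (i j : Nat) (hi : i < grid.length) (hj : j < (grid[i]'hi).length)
    (hij : ¬(i < a ∨ (i = a ∧ j < b))) :
    pvAt (pvMix P W grid a b) (i : Int) (j : Int) = some ((grid[i]'hi)[j]'hj) := by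
  unfold pvAt
  rw [PySem.List.pyGet?_natCast]
  rw [List.getElem?_eq_getElem (by simp [pvMix, hi] : i < (pvMix P W grid a b).length)]
  rw [Option.bind_some]
  rw [pvMix_getElem P W grid a b i hi]
  rw [PySem.List.pyGet?_natCast]
  rw [List.getElem?_eq_getElem (by simpa using hj)]
  rw [List.getElem_mapIdx]
  rw [if_neg (fun h' => hij h'.1.1)]

lemma pvFill_inner (grid : List (List Int)) (P : Int × Int → Bool) (W : Nat)
    (hwide : ∀ row ∈ grid, W ≤ row.length) (a : Nat) (ha : a < grid.length) :
    ∀ (b : Nat), b ≤ W →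
    (PySem.List.pyRange (b : Int) (W : Int) 1).foldl
      (fun g j => if (pvAt g (a : Int) j == some 0) && !(P ((a : Int), j))
        then PySem.List.pySetD g (a : Int) (PySem.List.pySetD (PySem.List.pyGetD g (a : Int) []) j 3) else g)
      (pvMix P W grid a b)
    = pvMix P W grid (a + 1) 0 := by
  intro b
  obtain ⟨n, hn⟩ : ∃ n, W - b = n := ⟨_, rfl⟩
  induction n generalizing b with
  | zero =>
    intro hb
    have hbe : b = W := by omega
    rw [hbe, PySem.List.pyRange_one_eq_nil (le_refl _), List.foldl_nil]
    apply pvMix_congr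
    intro i j hi hj _ _
    omega
  | succ n ihn =>
    intro hb
    have hblt : b < W := by omega
    rw [PySem.List.pyRange_one_cons (by exact_mod_cast hblt), List.foldl_cons]
    have hrowlen : W ≤ (grid[a]'ha).length := hwide _ (List.getElem_mem ha)
    have hjb : b < (grid[a]'ha).length := by omega
    have hat : pvAt (pvMix P W grid a b) (a : Int) (b : Int) = some ((grid[a]'ha)[b]'hjb) :=
      pvAt_mix P W grid a b a b ha hjb (by omega)
    have hstep : (if (pvAt (pvMix P W grid a b) (a : Int) (b : Int) == some 0) && !(P ((a : Int), (b : Int)))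
        then PySem.List.pySetD (pvMix P W grid a b) (a : Int)
          (PySem.List.pySetD (PySem.List.pyGetD (pvMix P W grid a b) (a : Int) []) (b : Int) 3)
        else pvMix P W grid a b)
        = pvMix P W grid a (b + 1) := by
      by_cases hcond : ((grid[a]'ha)[b]'hjb = 0) ∧ P ((a : Int), (b : Int)) = false
      · rw [if_pos (by simp [hat, hcond.1, hcond.2])]
        have hlen : a < (pvMix P W grid a b).length := by
          rw [pvMix_length]
          exact ha
        have hgetD : PySem.List.pyGetD (pvMix P W grid a b) (a : Int) [] =
            (pvMix P W grid a b)[a]'hlen := by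
          rw [PySem.List.pyGetD_natCast]
          exact List.getD_eq_getElem _ _ hlen
        rw [hgetD, PySem.List.pySetD_natCast, PySem.List.pySetD_natCast]
        apply List.ext_getElem (by simp [pvMix])
        intro i h1 h2
        have hi : i < grid.length := by simpa [pvMix] using h2
        by_cases hia : i = a
        · subst hia
          rw [List.getElem_set_self (by simpa [pvMix] using hi)]
          rw [pvMix_getElem P W grid i b i hi, pvMix_getElem P W grid i (b + 1) i hi]
          apply List.ext_getElem (by simp)
          intro j hj1 hj2
          have hj : j < (grid[i]'hi).length := by simpa using hj2
          rw [List.getElem_set (by simpa [pvMix_getElem P W grid i b i hi] using hj)]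
          rw [List.getElem_mapIdx, List.getElem_mapIdx]
          by_cases hjb' : b = j
          · subst hjb'
            rw [if_pos rfl]
            rw [if_pos ⟨⟨Or.inr ⟨rfl, by omega⟩, by omega⟩, hcond.1, hcond.2⟩]
          · rw [if_neg hjb']
            exact if_congr (and_congr_left' (by omega)) rfl rfl
        · rw [List.getElem_set_ne (by omega) (by simpa [pvMix] using hi)]
          rw [pvMix_getElem P W grid a b i hi, pvMix_getElem P W grid a (b + 1) i hi]
          apply List.ext_getElem (by simp)
          intro j hj1 hj2
          rw [List.getElem_mapIdx, List.getElem_mapIdx]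
          exact if_congr (and_congr_left' (by omega)) rfl rfl
      · rw [if_neg (by
          simp only [hat, Bool.and_eq_true, beq_iff_eq, Option.some.injEq, Bool.not_eq_true']
          intro h'
          exact hcond ⟨h'.1, h'.2⟩)]
        apply pvMix_congr
        intro i j hi hj hz hP
        constructor
        · intro h'
          exact ⟨by rcases h'.1 with h'' | h'' <;> [exact Or.inl h''; exact Or.inr ⟨h''.1, by omega⟩], h'.2⟩
        · intro h'
          refine ⟨?_, h'.2⟩
          rcases h'.1 with h'' | h''
          · exact Or.inl h''
          · refine Or.inr ⟨h''.1, ?_⟩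
            rcases Nat.lt_succ_iff_lt_or_eq.mp h''.2 with h3 | h3
            · exact h3
            · exfalso
              subst h3
              have hia : i = a := h''.1
              subst hia
              exact hcond ⟨by convert hz using 2, hP⟩
    rw [hstep]
    have hcast : ((b : Int) + 1) = ((b + 1 : Nat) : Int) := by push_cast; ring
    rw [hcast]
    exact ihn (b + 1) (by omega) (by omega)

lemma pvFill_outer (grid : List (List Int)) (P : Int × Int → Bool) (W : Nat)
    (hwide : ∀ row ∈ grid, W ≤ row.length) :
    ∀ (a : Nat), a ≤ grid.length →
    (PySem.List.pyRange (a : Int) (grid.length : Int) 1).foldl (fun g i =>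
      (PySem.List.pyRange 0 (W : Int) 1).foldl
        (fun g j => if (pvAt g i j == some 0) && !(P (i, j))
          then PySem.List.pySetD g i (PySem.List.pySetD (PySem.List.pyGetD g i []) j 3) else g) g)
      (pvMix P W grid a 0)
    = pvMix P W grid grid.length 0 := by
  intro a
  obtain ⟨n, hn⟩ : ∃ n, grid.length - a = n := ⟨_, rfl⟩
  induction n generalizing a with
  | zero =>
    intro ha
    have hae : a = grid.length := by omega
    subst hae
    rw [PySem.List.pyRange_one_eq_nil (le_refl _), List.foldl_nil]
  | succ n ihn =>
    intro ha
    have halt : a < grid.length := by omega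
    rw [show PySem.List.pyRange (a : Int) (grid.length : Int) 1
        = (a : Int) :: PySem.List.pyRange ((a : Int) + 1) (grid.length : Int) 1
      from PySem.List.pyRange_one_cons (by exact_mod_cast halt), List.foldl_cons]
    have hinner := pvFill_inner grid P W hwide a halt 0 (Nat.zero_le _)
    rw [Nat.cast_zero] at hinner
    rw [hinner]
    have hcast : ((a : Int) + 1) = ((a + 1 : Nat) : Int) := by push_cast; ring
    rw [hcast]
    exact ihn (a + 1) (by omega) (by omega)

-- A's half: the filled grid is pvMix with P = membership in the BFS visited set,
-- and P characterises border-reachability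
lemma pvMainA (grid : List (List Int)) (hg : grid ≠ []) (hh : grid.headD [] ≠ [])
    (hwide : ∀ row ∈ grid, (grid.headD []).length ≤ row.length) :
    ∃ P : Int × Int → Bool,
      transform grid = pvMix P (grid.headD []).length grid grid.length 0 ∧
      (∀ p : Int × Int, P p = true ↔
        pvReach grid (grid.length : Int) (((grid.headD []).length : Nat) : Int) p) := by
  have hdeg : ¬ (grid.isEmpty || (grid.headD []).isEmpty) = true := by
    simp only [Bool.or_eq_true, List.isEmpty_iff]
    rintro (h | h)
    · exact hg h
    · exact hh h
  unfold transform
  rw [if_neg hdeg]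
  have hcopy : grid.map (fun row => PySem.List.slice row none none) = grid := by
    simp [PySem.List.slice_none_none]
  simp only [hcopy, PySem.List.len_eq, Int.toNat_natCast]
  simp only [pvSeedA_eq grid (grid.length : Int) (((grid.headD []).length : Nat) : Int)]
  obtain ⟨hqvA, hndA, hmemA⟩ := pvSeedFold_specA grid
    (pvCands (grid.length : Int) (((grid.headD []).length : Nat) : Int)) [] PySem.Set.empty
    List.nodup_nil (fun _ => Iff.rfl)
  have hr1 : (1 : Int) ≤ (grid.length : Int) := by
    have := List.length_pos_of_ne_nil hg
    omega
  have hc1 : (1 : Int) ≤ (((grid.headD []).length : Nat) : Int) := by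
    have := List.length_pos_of_ne_nil hh
    omega
  have hborder : ∀ x : Int × Int,
      (x ∈ pvCands (grid.length : Int) (((grid.headD []).length : Nat) : Int) ∧
        pvAt grid x.1 x.2 = some 0)
      ↔ pvBorder grid (grid.length : Int) (((grid.headD []).length : Nat) : Int) x := by
    intro x
    rw [mem_pvCands _ _ hr1 hc1]
    unfold pvBorder pvGood
    tauto
  have hmemA' : ∀ x, x ∈ (List.foldl (pvSeedStepA grid) ([], PySem.Set.empty)
      (pvCands (grid.length : Int) (((grid.headD []).length : Nat) : Int))).2 ↔
      pvBorder grid (grid.length : Int) (((grid.headD []).length : Nat) : Int) x := by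
    intro x
    rw [hmemA x]
    simp only [PySem.Set.empty, List.not_mem_nil, false_or]
    exact hborder x
  have hvA := pvBfsA_spec grid (grid.length : Int) (((grid.headD []).length : Nat) : Int)
    ((List.foldl (pvSeedStepA grid) ([], PySem.Set.empty)
      (pvCands (grid.length : Int) (((grid.headD []).length : Nat) : Int))).1.length +
      2 * (grid.length * (grid.headD []).length))
    (List.foldl (pvSeedStepA grid) ([], PySem.Set.empty)
      (pvCands (grid.length : Int) (((grid.headD []).length : Nat) : Int))).1
    (List.foldl (pvSeedStepA grid) ([], PySem.Set.empty)
      (pvCands (grid.length : Int) (((grid.headD []).length : Nat) : Int))).2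
    hndA
    (fun p hp => ((hmemA' p).mp hp).1)
    (fun p hp => ⟨p, (hmemA' p).mp hp, Relation.ReflTransGen.refl⟩)
    (fun p hp => (hqvA p).mp hp)
    (fun p hp hnp => absurd ((hqvA p).mpr hp) hnp)
    (fun p hp => (hmemA' p).mpr hp)
    (by simp only [Int.toNat_natCast]; omega)
  refine ⟨(fun p : Int × Int => PySem.Set.contains
      (pvBfsA grid (grid.length : Int) (((grid.headD []).length : Nat) : Int)
        ((List.foldl (pvSeedStepA grid) ([], PySem.Set.empty)
          (pvCands (grid.length : Int) (((grid.headD []).length : Nat) : Int))).1.length +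
          2 * (grid.length * (grid.headD []).length))
        (List.foldl (pvSeedStepA grid) ([], PySem.Set.empty)
          (pvCands (grid.length : Int) (((grid.headD []).length : Nat) : Int))).1
        (List.foldl (pvSeedStepA grid) ([], PySem.Set.empty)
          (pvCands (grid.length : Int) (((grid.headD []).length : Nat) : Int))).2) p),
    ?_, ?_⟩
  · have h0 := pvFill_outer grid
      (fun p : Int × Int => PySem.Set.contains
        (pvBfsA grid (grid.length : Int) (((grid.headD []).length : Nat) : Int)
          ((List.foldl (pvSeedStepA grid) ([], PySem.Set.empty)
            (pvCands (grid.length : Int) (((grid.headD []).length : Nat) : Int))).1.length +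
            2 * (grid.length * (grid.headD []).length))
          (List.foldl (pvSeedStepA grid) ([], PySem.Set.empty)
            (pvCands (grid.length : Int) (((grid.headD []).length : Nat) : Int))).1
          (List.foldl (pvSeedStepA grid) ([], PySem.Set.empty)
            (pvCands (grid.length : Int) (((grid.headD []).length : Nat) : Int))).2) p)
      (grid.headD []).length hwide 0 (Nat.zero_le _)
    rw [Nat.cast_zero, pvMix_zero] at h0
    exact h0
  · intro p
    rw [PySem.Set.contains_iff]
    exact hvA p

-- ===== B-side lemmas =====

-- neighbourhood is symmetric
lemma pvNbrs_symm (x c : Int × Int) : x ∈ pvNbrs c ↔ c ∈ pvNbrs x := by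
  simp [pvNbrs, Prod.ext_iff]
  omega

-- all cell positions of the rows×cols rectangle, row-major
def pvAllCells (rows cols : Int) : List (Int × Int) :=
  (PySem.List.pyRange 0 rows 1).flatMap (fun i =>
    (PySem.List.pyRange 0 cols 1).map (fun j => (i, j)))

lemma mem_pvAllCells (rows cols : Int) (x : Int × Int) :
    x ∈ pvAllCells rows cols ↔ (0 ≤ x.1 ∧ x.1 < rows ∧ 0 ≤ x.2 ∧ x.2 < cols) := by
  obtain ⟨x1, x2⟩ := x
  simp only [pvAllCells, List.mem_flatMap, List.mem_map, PySem.List.mem_pyRange_one,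
    Prod.mk.injEq]
  constructor
  · rintro ⟨i, hi, j, hj, rfl, rfl⟩
    exact ⟨hi.1, hi.2, hj.1, hj.2⟩
  · rintro ⟨h1, h2, h3, h4⟩
    exact ⟨x1, ⟨h1, h2⟩, x2, ⟨h3, h4⟩, rfl, rfl⟩

lemma pvZeros_eq_fold (grid : List (List Int)) (rows cols : Int) :
    pvZeros grid rows cols = (pvAllCells rows cols).foldl
      (fun s p => if pvAt grid p.1 p.2 == some 0 then PySem.Set.add s p else s)
      PySem.Set.empty := by
  simp [pvZeros, pvAllCells, List.foldl_flatMap, List.foldl_map]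

lemma pvFoldAddIf_spec (grid : List (List Int)) (ps : List (Int × Int)) :
    ∀ (s : PySem.Set (Int × Int)), s.Nodup →
    (ps.foldl (fun s p => if pvAt grid p.1 p.2 == some 0 then PySem.Set.add s p else s) s).Nodup ∧
    (∀ x, x ∈ ps.foldl (fun s p => if pvAt grid p.1 p.2 == some 0 then PySem.Set.add s p else s) s ↔
      x ∈ s ∨ (x ∈ ps ∧ pvAt grid x.1 x.2 = some 0)) := by
  induction ps with
  | nil =>
    intro s hs
    exact ⟨hs, by simp⟩
  | cons p ps ih =>
    intro s hs
    rw [List.foldl_cons]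
    by_cases hz : pvAt grid p.1 p.2 = some 0
    · rw [if_pos (by simp [hz])]
      obtain ⟨h1, h2⟩ := ih (PySem.Set.add s p) (PySem.Set.nodup_add (s := s) (x := p) hs)
      refine ⟨h1, ?_⟩
      intro x
      rw [h2 x, PySem.Set.mem_add]
      constructor
      · rintro ((hx | rfl) | ⟨hx, hz'⟩)
        · exact Or.inl hx
        · exact Or.inr ⟨List.mem_cons_self .., hz⟩
        · exact Or.inr ⟨List.mem_cons_of_mem _ hx, hz'⟩
      · rintro (hx | ⟨hx, hz'⟩)
        · exact Or.inl (Or.inl hx)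
        · rcases List.mem_cons.mp hx with rfl | hx'
          · exact Or.inl (Or.inr rfl)
          · exact Or.inr ⟨hx', hz'⟩
    · rw [if_neg (by simp [hz])]
      obtain ⟨h1, h2⟩ := ih s hs
      refine ⟨h1, ?_⟩
      intro x
      rw [h2 x]
      constructor
      · rintro (hx | ⟨hx, hz'⟩)
        · exact Or.inl hx
        · exact Or.inr ⟨List.mem_cons_of_mem _ hx, hz'⟩
      · rintro (hx | ⟨hx, hz'⟩)
        · exact Or.inl hx
        · rcases List.mem_cons.mp hx with rfl | hx'
          · exact absurd hz' hz
          · exact Or.inr ⟨hx', hz'⟩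

lemma pvZeros_spec (grid : List (List Int)) (rows cols : Int) :
    (pvZeros grid rows cols).Nodup ∧
    (∀ x, x ∈ pvZeros grid rows cols ↔ pvGood grid rows cols x) := by
  rw [pvZeros_eq_fold]
  obtain ⟨h1, h2⟩ := pvFoldAddIf_spec grid (pvAllCells rows cols) PySem.Set.empty List.nodup_nil
  refine ⟨h1, ?_⟩
  intro x
  rw [h2 x, mem_pvAllCells]
  simp only [PySem.Set.empty, List.not_mem_nil, false_or]
  unfold pvGood
  tauto

-- the generic 'fold add-if' over a duplicate-free list is a filter
lemma pvFoldFilter (c : (Int × Int) → Bool) (l : List (Int × Int)) :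
    ∀ (k0 : List (Int × Int)), (∀ x ∈ l, x ∉ k0) → l.Nodup →
    l.foldl (fun k p => if c p then PySem.Set.add k p else k) k0 = k0 ++ l.filter c := by
  induction l with
  | nil =>
    intro k0 _ _
    simp
  | cons a l ih =>
    intro k0 hd hn
    rw [List.foldl_cons]
    by_cases hca : c a = true
    · rw [if_pos hca, PySem.Set.add_of_not_mem (hd a (List.mem_cons_self ..))]
      rw [ih (k0 ++ [a]) ?_ (List.Nodup.of_cons hn)]
      · simp [hca]
      · intro x hx hmem
        rcases List.mem_append.mp hmem with h | h
        · exact hd x (List.mem_cons_of_mem _ hx) h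
        · have hxa : x = a := by simpa using h
          subst hxa
          exact (List.nodup_cons.mp hn).1 hx
    · rw [if_neg (by simp [hca]), ih k0 (fun x hx => hd x (List.mem_cons_of_mem _ hx)) (List.Nodup.of_cons hn)]
      simp [hca]

lemma pvSweep_eq_filter (grid : List (List Int)) (rows cols : Int)
    (e : PySem.Set (Int × Int)) (he : e.Nodup) :
    pvSweep grid rows cols e = e.filter (pvKeepCond grid rows cols e) := by
  unfold pvSweep
  rw [pvFoldFilter (pvKeepCond grid rows cols e) e PySem.Set.empty (by simp [PySem.Set.empty]) he]
  simp [PySem.Set.empty]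

lemma pvKeepCond_iff (grid : List (List Int)) (rows cols : Int)
    (e : PySem.Set (Int × Int)) (p : Int × Int) :
    pvKeepCond grid rows cols e p = true ↔
      (¬ (p.1 = 0 ∨ p.1 = rows - 1 ∨ p.2 = 0 ∨ p.2 = cols - 1)) ∧
      (∀ n ∈ pvNbrs p, n ∈ e ∨ ¬ pvAt grid n.1 n.2 = some 0) := by
  unfold pvKeepCond
  simp only [Bool.and_eq_true, Bool.not_eq_true', Bool.or_eq_false_iff, beq_eq_false_iff_ne,
    ne_eq, List.all_eq_true, Bool.or_eq_true]
  constructor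
  · rintro ⟨⟨⟨⟨h1, h2⟩, h3⟩, h4⟩, h5⟩
    refine ⟨by tauto, ?_⟩
    intro n hn
    rcases h5 n hn with h | h
    · exact Or.inl ((PySem.Set.contains_iff e n).mp h)
    · exact Or.inr (by simpa using h)
  · rintro ⟨h1, h2⟩
    refine ⟨⟨⟨⟨?_, ?_⟩, ?_⟩, ?_⟩, ?_⟩
    · tauto
    · tauto
    · tauto
    · tauto
    · intro n hn
      rcases h2 n hn with h | h
      · exact Or.inl ((PySem.Set.contains_iff e n).mpr h)
      · exact Or.inr (by simpa using h)

-- every enclosed cell survives one sweep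
lemma pvSweep_keeps_encl (grid : List (List Int)) (rows cols : Int)
    (e : PySem.Set (Int × Int))
    (hencl : ∀ x, pvEncl grid rows cols x → x ∈ e) :
    ∀ x, pvEncl grid rows cols x → x ∈ e.filter (pvKeepCond grid rows cols e) := by
  intro x hx
  obtain ⟨hgood, hnreach⟩ := hx
  obtain ⟨hx1, hx2, hx3, hx4, hx5⟩ := hgood
  have hnb : ¬ (x.1 = 0 ∨ x.1 = rows - 1 ∨ x.2 = 0 ∨ x.2 = cols - 1) := by
    intro hb
    exact hnreach ⟨x, ⟨⟨hx1, hx2, hx3, hx4, hx5⟩, hb⟩, Relation.ReflTransGen.refl⟩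
  refine List.mem_filter.mpr ⟨hencl x ⟨⟨hx1, hx2, hx3, hx4, hx5⟩, hnreach⟩, ?_⟩
  rw [pvKeepCond_iff]
  refine ⟨hnb, ?_⟩
  intro n hn
  by_cases hz : pvAt grid n.1 n.2 = some 0
  · left
    have hbounds : 0 ≤ n.1 ∧ n.1 < rows ∧ 0 ≤ n.2 ∧ n.2 < cols := by
      simp only [pvNbrs, List.mem_cons, List.not_mem_nil, or_false] at hn
      rcases hn with rfl | rfl | rfl | rfl <;> simp <;> omega
    have hngood : pvGood grid rows cols n :=
      ⟨hbounds.1, hbounds.2.1, hbounds.2.2.1, hbounds.2.2.2, hz⟩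
    refine hencl n ⟨hngood, ?_⟩
    intro ⟨b, hb, path⟩
    exact hnreach ⟨b, hb, path.tail ⟨⟨hx1, hx2, hx3, hx4, hx5⟩, (pvNbrs_symm x n).mpr hn⟩⟩
  · exact Or.inr hz

-- at a fixpoint, no border-reachable cell is in the set
lemma pvFixpoint_no_reach (grid : List (List Int)) (rows cols : Int)
    (e : PySem.Set (Int × Int))
    (hfix : ∀ x ∈ e, pvKeepCond grid rows cols e x = true) :
    ∀ x, pvReach grid rows cols x → x ∉ e := by
  have main : ∀ x, pvReach grid rows cols x → pvGood grid rows cols x ∧ x ∉ e := by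
    rintro x ⟨b, hb, path⟩
    induction path with
    | refl =>
      refine ⟨hb.1, ?_⟩
      intro hbe
      exact ((pvKeepCond_iff grid rows cols e b).mp (hfix b hbe)).1 hb.2
    | tail _ hstep ih =>
      rename_i c x' _
      refine ⟨hstep.1, ?_⟩
      intro hxe
      have hcond := (pvKeepCond_iff grid rows cols e x').mp (hfix x' hxe)
      have hcnbr : c ∈ pvNbrs x' := (pvNbrs_symm x' c).mp hstep.2
      rcases hcond.2 c hcnbr with hce | hcz
      · exact ih.2 hce
      · exact hcz ih.1.2.2.2.2
  exact fun x hx => (main x hx).2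

-- the shrink loop reaches a fixpoint characterising exactly the enclosed cells
lemma pvShrink_spec (grid : List (List Int)) (rows cols : Int) :
    ∀ (fuel : Nat) (e : PySem.Set (Int × Int)), e.Nodup →
    (∀ p ∈ e, pvGood grid rows cols p) →
    (∀ x, pvEncl grid rows cols x → x ∈ e) →
    e.length < fuel →
    ∀ x, x ∈ pvShrink grid rows cols fuel e ↔ pvEncl grid rows cols x := by
  intro fuel
  induction fuel with
  | zero =>
    intro e _ _ _ hlt
    omega
  | succ fuel ih =>
    intro e hnd hgood hencl hlt
    have hsw := pvSweep_eq_filter grid rows cols e hnd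
    have hres : pvShrink grid rows cols (fuel + 1) e =
        (if (pvSweep grid rows cols e).length == e.length then pvSweep grid rows cols e
         else pvShrink grid rows cols fuel (pvSweep grid rows cols e)) := rfl
    by_cases hlen : (pvSweep grid rows cols e).length = e.length
    · have hfilter_eq : e.filter (pvKeepCond grid rows cols e) = e := by
        apply List.Sublist.eq_of_length (List.filter_sublist (l := e))
        rw [← hsw]
        exact hlen
      have hfix : ∀ x ∈ e, pvKeepCond grid rows cols e x = true := by
        intro x hx
        exact List.of_mem_filter (hfilter_eq ▸ hx)
      rw [hres, if_pos (by simp [hlen]), hsw, hfilter_eq]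
      intro x
      constructor
      · intro hx
        exact ⟨hgood x hx, fun hr => (pvFixpoint_no_reach grid rows cols e hfix x hr) hx⟩
      · exact hencl x
    · have hle : (pvSweep grid rows cols e).length ≤ e.length := by
        rw [hsw]
        exact List.Sublist.length_le (List.filter_sublist (l := e))
      rw [hres, if_neg (by simp [hlen])]
      apply ih
      · rw [hsw]
        exact hnd.filter _
      · intro p hp
        rw [hsw] at hp
        exact hgood p (List.mem_of_mem_filter hp)
      · intro x hx
        rw [hsw]
        exact pvSweep_keeps_encl grid rows cols e hencl x hx
      · omega

-- B's output written as a mapIdx over the grid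
lemma pvEnum_eq_mapIdx (Q : Int × Int → Bool) (grid : List (List Int)) :
    ((PySem.List.enumerate grid 0).map (fun ir =>
      (PySem.List.enumerate ir.2 0).map (fun jv =>
        if Q (ir.1, jv.1) then 3 else jv.2)))
    = grid.mapIdx (fun i row => row.mapIdx (fun j v =>
        if Q ((i : Int), (j : Int)) then 3 else v)) := by
  apply List.ext_getElem (by simp [PySem.List.length_enumerate])
  intro i h1 h2
  have hi : i < grid.length := by simpa [PySem.List.length_enumerate] using h1
  rw [List.getElem_map, PySem.List.getElem_enumerate, List.getElem_mapIdx]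
  apply List.ext_getElem (by simp [PySem.List.length_enumerate])
  intro j hj1 hj2
  have hj : j < (grid[i]'hi).length := by simpa using hj2
  rw [List.getElem_map, PySem.List.getElem_enumerate, List.getElem_mapIdx]
  simp only [zero_add]

-- B's half: the output is a mapIdx fill by Q = membership in the final enclosed set,
-- and Q characterises 'in-bounds zero not reachable from the border'
lemma pvMainB (grid : List (List Int)) (hg : grid ≠ []) (hh : grid.headD [] ≠ []) :
    ∃ Q : Int × Int → Bool,
      transform_alt grid = grid.mapIdx (fun i row => row.mapIdx (fun j v =>
        if Q ((i : Int), (j : Int)) then 3 else v)) ∧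
      (∀ p : Int × Int, Q p = true ↔
        pvEncl grid (grid.length : Int) (((grid.headD []).length : Nat) : Int) p) := by
  have hdeg : ¬ (grid.isEmpty || (grid.headD []).isEmpty) = true := by
    simp only [Bool.or_eq_true, List.isEmpty_iff]
    rintro (h | h)
    · exact hg h
    · exact hh h
  unfold transform_alt
  rw [if_neg hdeg]
  simp only [PySem.List.len_eq]
  obtain ⟨hz1, hz2⟩ := pvZeros_spec grid (grid.length : Int) (((grid.headD []).length : Nat) : Int)
  have hshr := pvShrink_spec grid (grid.length : Int) (((grid.headD []).length : Nat) : Int)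
    ((pvZeros grid (grid.length : Int) (((grid.headD []).length : Nat) : Int)).length + 1)
    (pvZeros grid (grid.length : Int) (((grid.headD []).length : Nat) : Int))
    hz1
    (fun p hp => (hz2 p).mp hp)
    (fun x hx => (hz2 x).mpr hx.1)
    (by omega)
  refine ⟨fun p => PySem.Set.contains
      (pvShrink grid (grid.length : Int) (((grid.headD []).length : Nat) : Int)
        ((pvZeros grid (grid.length : Int) (((grid.headD []).length : Nat) : Int)).length + 1)
        (pvZeros grid (grid.length : Int) (((grid.headD []).length : Nat) : Int))) p,
    pvEnum_eq_mapIdx _ grid, ?_⟩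
  intro p
  rw [PySem.Set.contains_iff]
  exact hshr p

lemma pvAt_natCast (grid : List (List Int)) (i j : Nat) (hi : i < grid.length)
    (hj : j < (grid[i]'hi).length) :
    pvAt grid (i : Int) (j : Int) = some ((grid[i]'hi)[j]'hj) := by
  unfold pvAt
  rw [PySem.List.pyGet?_natCast, List.getElem?_eq_getElem hi, Option.bind_some,
    PySem.List.pyGet?_natCast, List.getElem?_eq_getElem hj]

-- the two fills coincide cell by cell
lemma pvMix_eq_mapIdx (grid : List (List Int)) (W : Nat) (P Q : Int × Int → Bool)
    (h : ∀ (i j : Nat) (hi : i < grid.length) (hj : j < (grid[i]'hi).length),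
      ((j < W ∧ (grid[i]'hi)[j]'hj = 0 ∧ P ((i : Int), (j : Int)) = false) ↔
        Q ((i : Int), (j : Int)) = true)) :
    pvMix P W grid grid.length 0 =
      grid.mapIdx (fun i row => row.mapIdx (fun j v =>
        if Q ((i : Int), (j : Int)) then 3 else v)) := by
  apply List.ext_getElem (by simp [pvMix])
  intro i h1 h2
  have hi : i < grid.length := by simpa [pvMix] using h1
  rw [pvMix_getElem P W grid grid.length 0 i hi, List.getElem_mapIdx]
  apply List.ext_getElem (by simp)
  intro j hj1 hj2
  have hj : j < (grid[i]'hi).length := by simpa using hj1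
  rw [List.getElem_mapIdx, List.getElem_mapIdx]
  have hiff := h i j hi hj
  by_cases hq : Q ((i : Int), (j : Int)) = true
  · rw [if_pos hq]
    obtain ⟨hjW, hz, hP⟩ := hiff.mpr hq
    rw [if_pos ⟨⟨Or.inl hi, hjW⟩, hz, hP⟩]
  · rw [if_neg hq]
    rw [if_neg]
    intro ⟨⟨_, hjW⟩, hz, hP⟩
    exact hq (hiff.mp ⟨hjW, hz, hP⟩)

-- ===== VERDICT (by name: the statement is the Claim_ definition above) =====
set_option maxHeartbeats 1000000 in
theorem transform_spec : Claim_equal_transform := by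
  intro grid hDom hPre
  unfold Spec_transform
  by_cases hdeg : (grid.isEmpty || (grid.headD []).isEmpty) = true
  · unfold transform transform_alt
    rw [if_pos hdeg, if_pos hdeg]
  · have hg : grid ≠ [] := fun h => hdeg (by simp [h])
    have hh : grid.headD [] ≠ [] := fun h => hdeg (by rw [h]; simp)
    obtain ⟨P, hA, hP⟩ := pvMainA grid hg hh hPre
    obtain ⟨Q, hB, hQ⟩ := pvMainB grid hg hh
    rw [hA, hB]
    apply pvMix_eq_mapIdx
    intro i j hi hj
    have hW : (grid.headD []).length ≤ (grid[i]'hi).length := hPre _ (List.getElem_mem hi)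
    constructor
    · rintro ⟨hjW, hz, hPf⟩
      rw [hQ]
      have hat : pvAt grid (i : Int) (j : Int) = some 0 := by
        rw [pvAt_natCast grid i j hi hj, hz]
      refine ⟨⟨by simp, by simpa using hi, by simp, by simpa using hjW, hat⟩, ?_⟩
      intro hr
      rw [← hP ((i : Int), (j : Int))] at hr
      rw [hPf] at hr
      exact Bool.false_ne_true hr
    · intro hq
      obtain ⟨⟨hb1, hb2, hb3, hb4, hat⟩, hnr⟩ := (hQ ((i : Int), (j : Int))).mp hq
      have hjW : j < (grid.headD []).length := by simpa using hb4
      have hz : (grid[i]'hi)[j]'hj = 0 := by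
        rw [pvAt_natCast grid i j hi hj] at hat
        injection hat
      refine ⟨hjW, hz, ?_⟩
      cases hPv : P ((i : Int), (j : Int)) with
      | false => rfl
      | true => exact absurd ((hP _).mp hPv) hnr
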